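-- pv_equiv track=rewrite | github.com/mcmlevi/AOC_2023_python | source/day9.py | build_difference_tree
-- ===== SOURCE A (Python) =====
-- def build_difference_tree(entry):
--     """build the difference tree based on oasis history data
--
--     :param entry: the history entry to calculate the difference tree of
--     :return: tree of all differences
--     """
--     tree = [entry]
--     all_zero = False
--     while all_zero is False:
--         all_zero = True
--         tree.append([])
--
--         if len(tree[-2]) == 1:
--             tree[-1].append(0)
--
--         for x,y in zip(tree[-2], tree[-2][1:]):
--             # This gives us the abs distance however the difference might be negative as well if
--             # y is smaller then x and then it needs to be inverted
--             difference = abs(y - x)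
--             if y < x :
--                 difference = -difference
--
--             tree[-1].append(difference)
--             if difference != 0:
--                 all_zero = False
--
--     return tree
-- ===== SOURCE B (Python) =====
-- def _next_level(level):
--     """The level below `level`: [0] for a singleton, else pairwise differences."""
--     if len(level) == 1:
--         return [0]
--     return [y - x for x, y in zip(level, level[1:])]
--
--
-- def build_difference_tree(entry):
--     """build the difference tree based on oasis history data
--
--     :param entry: the history entry to calculate the difference tree of
--     :return: tree of all differences
--     """
--     nxt = _next_level(entry)
--     if all(v == 0 for v in nxt):
--         return [entry, nxt]
--     return [entry] + build_difference_tree(nxt)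
-- ===== Notes on version B (the rewrite author's own statement) =====
-- stated objective: simpler
-- what changed: Replaces the imperative while-loop that mutates a growing tree list in place with an all_zero flag by a recursive decomposition: a small next-level helper plus structural recursion on the shrinking level.
import Mathlib
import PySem

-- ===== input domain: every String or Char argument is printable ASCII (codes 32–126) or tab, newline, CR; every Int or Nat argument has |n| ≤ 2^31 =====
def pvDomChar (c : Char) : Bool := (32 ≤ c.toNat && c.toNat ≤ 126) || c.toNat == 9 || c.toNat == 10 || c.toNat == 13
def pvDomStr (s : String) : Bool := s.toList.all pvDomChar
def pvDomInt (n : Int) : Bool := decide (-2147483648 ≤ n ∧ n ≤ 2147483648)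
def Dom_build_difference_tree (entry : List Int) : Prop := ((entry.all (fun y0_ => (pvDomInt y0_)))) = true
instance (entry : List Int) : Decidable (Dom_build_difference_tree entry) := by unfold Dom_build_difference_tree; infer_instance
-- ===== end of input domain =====

-- B replaces A's imperative while-loop over a mutated tree with recursion on the shrinking
-- difference level (same values; objective: simpler).

-- ===== PORT A =====
-- one iteration of A's while body: starting from the freshly appended level
-- ([0] when the previous level is a singleton, else []) and all_zero = True,
-- fold over zip(tree[-2], tree[-2][1:]) appending differences and updating all_zero
def pvStepA (prev : List Int) : List Int × Bool :=
  (prev.zip (PySem.List.slice prev (some 1) none)).foldl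
    (fun s p =>
      let difference := |p.2 - p.1|
      let difference := if p.2 < p.1 then -difference else difference
      (s.1 ++ [difference], if difference ≠ 0 then false else s.2))
    (if prev.length == 1 then ([0], true) else ([], true))

-- characterisation of the fold in pvStepA (the port's termination proof needs it)
theorem pvFoldA_eq (l : List (Int × Int)) (init : List Int) (b : Bool) :
    l.foldl
      (fun s p =>
        let difference := |p.2 - p.1|
        let difference := if p.2 < p.1 then -difference else difference
        (s.1 ++ [difference], if difference ≠ 0 then false else s.2))
      (init, b)
    = (init ++ l.map (fun p => p.2 - p.1), b && l.all (fun p => p.2 - p.1 == 0)) := by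
  induction l generalizing init b with
  | nil => simp
  | cons p l ih =>
    have hd : (if p.2 < p.1 then -|p.2 - p.1| else |p.2 - p.1|) = p.2 - p.1 := by
      rcases lt_or_ge p.2 p.1 with h | h
      · simp only [if_pos h]; rw [abs_of_neg (by omega)]; ring
      · simp only [if_neg (not_lt.mpr h)]; exact abs_of_nonneg (by omega)
    simp only [List.foldl_cons, List.map_cons, List.all_cons]
    rw [hd] at *
    rw [ih]
    refine Prod.ext ?_ ?_
    · simp only [List.append_assoc]; rfl
    · by_cases h0 : p.2 - p.1 = 0 <;> simp [h0]

theorem pvStepA_len (prev : List Int) (h : (pvStepA prev).2 = false) :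
    (pvStepA prev).1.length < prev.length := by
  unfold pvStepA at *
  rw [PySem.List.slice_from_one] at *
  by_cases h1 : prev.length == 1
  · rw [if_pos h1, pvFoldA_eq] at h
    rcases prev with _ | ⟨x, _ | ⟨y, t⟩⟩ <;> simp_all
  · rw [if_neg h1, pvFoldA_eq] at *
    rcases prev with _ | ⟨x, _ | ⟨y, t⟩⟩ <;> simp_all

-- the while loop: acc is the tree built so far, last = tree[-2] at iteration entry
def pvBuildLoop (acc : List (List Int)) (last : List Int) : List (List Int) :=
  let s := pvStepA last
  if s.2 then acc ++ [s.1] else pvBuildLoop (acc ++ [s.1]) s.1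
termination_by last.length
decreasing_by rename_i h; exact pvStepA_len last (by simpa using h)

def build_difference_tree (entry : List Int) : List (List Int) :=
  pvBuildLoop [entry] entry

-- ===== PORT B =====
def pvNextLevel (level : List Int) : List Int :=
  if level.length == 1 then [0]
  else (level.zip (PySem.List.slice level (some 1) none)).map (fun p => p.2 - p.1)

theorem pvNextLevel_len (level : List Int)
    (h : (pvNextLevel level).all (fun v => v == 0) = false) :
    (pvNextLevel level).length < level.length := by
  unfold pvNextLevel at *
  rw [PySem.List.slice_from_one] at *
  rcases level with _ | ⟨x, _ | ⟨y, t⟩⟩ <;> simp_all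

def build_difference_tree_alt (entry : List Int) : List (List Int) :=
  let nxt := pvNextLevel entry
  if nxt.all (fun v => v == 0) then [entry, nxt]
  else entry :: build_difference_tree_alt nxt
termination_by entry.length
decreasing_by rename_i h; exact pvNextLevel_len entry (by simpa using h)

-- ===== PRECONDITION & SPEC =====
def Spec_build_difference_tree (entry : List Int) (out : List (List Int)) : Prop := out = build_difference_tree_alt entry
instance (entry : List Int) (out : List (List Int)) : Decidable (Spec_build_difference_tree entry out) := by unfold Spec_build_difference_tree; infer_instance

-- ===== CLAIM (what is proved, stated in full; the proofs are below) =====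
def Claim_equal_build_difference_tree : Prop := ∀ (entry : List Int), Dom_build_difference_tree entry → Spec_build_difference_tree entry (build_difference_tree entry)

-- ===== LEMMAS AND PROOFS =====
theorem pvStepA_eq (prev : List Int) :
    pvStepA prev = (pvNextLevel prev, (pvNextLevel prev).all (fun v => v == 0)) := by
  unfold pvStepA pvNextLevel
  by_cases h1 : prev.length == 1
  · rw [if_pos h1, if_pos h1, pvFoldA_eq]
    have : prev.zip (PySem.List.slice prev (some 1) none) = [] := by
      rw [PySem.List.slice_from_one]
      rcases prev with _ | ⟨x, t⟩ <;> simp_all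
    simp [this]
  · rw [if_neg h1, if_neg h1, pvFoldA_eq, List.all_map]
    simp only [List.nil_append, Bool.true_and]
    rfl

theorem alt_cons (entry : List Int) :
    build_difference_tree_alt entry = entry :: (build_difference_tree_alt entry).tail := by
  rw [build_difference_tree_alt]
  split <;> simp

theorem loop_eq (n : ℕ) (level : List Int) (hn : level.length ≤ n) (acc : List (List Int)) :
    pvBuildLoop acc level = acc ++ (build_difference_tree_alt level).tail := by
  induction n generalizing level acc with
  | zero =>
    rw [pvBuildLoop, build_difference_tree_alt, pvStepA_eq]
    have hlv : level = [] := by cases level <;> simp_all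
    subst hlv
    simp [pvNextLevel]
  | succ n ih =>
    rw [pvBuildLoop, build_difference_tree_alt, pvStepA_eq]
    by_cases h : (pvNextLevel level).all (fun v => v == 0)
    · simp [h]
    · simp only [Bool.not_eq_true] at h
      simp only [h, if_neg Bool.false_ne_true]
      rw [ih (pvNextLevel level) (by have := pvNextLevel_len level h; omega) (acc ++ [pvNextLevel level])]
      rw [alt_cons (pvNextLevel level)]
      simp

-- ===== VERDICT (by name: the statement is the Claim_ definition above) =====
theorem build_difference_tree_spec : Claim_equal_build_difference_tree := by
  intro entry _
  unfold Spec_build_difference_tree build_difference_tree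
  rw [loop_eq entry.length entry le_rfl [entry], alt_cons entry]
  simp
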